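-- pv_equiv track=rewrite | github.com/rwalkerlewis/9m_Test | src/acoustic_sim/fdtd_3d.py | _split_slabs
-- ===== SOURCE A (Python) =====
-- def _split_slabs(nz: int, size: int) -> list[tuple[int, int]]:
--     """Return [(slab_start, slab_end), ...] for each rank (exclusive end)."""
--     base = nz // size
--     remainder = nz % size
--     splits: list[tuple[int, int]] = []
--     start = 0
--     for r in range(size):
--         count = base + (1 if r < remainder else 0)
--         splits.append((start, start + count))
--         start += count
--     return splits
-- ===== SOURCE B (Python) =====
-- def _split_slabs(nz: int, size: int) -> list[tuple[int, int]]: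
--     """Return [(slab_start, slab_end), ...] for each rank (exclusive end)."""
--     base = nz // size
--     remainder = nz % size
--     return [(r * base + min(r, remainder), (r + 1) * base + min(r + 1, remainder))
--             for r in range(size)]
-- ===== Notes on version B (the rewrite author's own statement) =====
-- stated objective: simpler
-- what changed: The accumulator-passing loop (running start offset) is replaced by a stateless comprehension computing each slab independently from the closed form start = r*base + min(r, remainder).
import Mathlib
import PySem

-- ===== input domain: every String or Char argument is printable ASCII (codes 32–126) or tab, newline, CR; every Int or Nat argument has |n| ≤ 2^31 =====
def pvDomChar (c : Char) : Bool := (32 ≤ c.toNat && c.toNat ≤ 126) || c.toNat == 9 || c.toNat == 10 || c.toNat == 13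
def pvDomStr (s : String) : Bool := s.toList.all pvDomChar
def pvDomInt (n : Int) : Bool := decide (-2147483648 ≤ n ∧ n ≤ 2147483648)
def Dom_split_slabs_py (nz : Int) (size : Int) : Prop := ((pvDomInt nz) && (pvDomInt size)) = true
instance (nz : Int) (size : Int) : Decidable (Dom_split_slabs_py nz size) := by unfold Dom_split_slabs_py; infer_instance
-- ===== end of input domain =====

-- B replaces A's running-offset accumulator loop by a stateless per-rank closed form (simpler decomposition; same cost).

-- ===== PORT A =====
-- literal port of A: base/remainder, then a loop appending (start, start+count) while advancing start
def split_slabs_py (nz : Int) (size : Int) : List (Int × Int) :=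
  let base := PySem.Int.floordiv nz size
  let remainder := PySem.Int.mod nz size
  let st := (PySem.List.pyRange 0 size 1).foldl
    (fun (st : List (Int × Int) × Int) (r : Int) =>
      let count := base + (if r < remainder then 1 else 0)
      (st.1 ++ [(st.2, st.2 + count)], st.2 + count))
    ([], 0)
  st.1

-- ===== PORT B =====
-- literal port of B: a map over range(size) with the closed-form start r*base + min(r, remainder)
def split_slabs_py_alt (nz : Int) (size : Int) : List (Int × Int) :=
  let base := PySem.Int.floordiv nz size
  let remainder := PySem.Int.mod nz size
  (PySem.List.pyRange 0 size 1).map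
    (fun r => (r * base + min r remainder, (r + 1) * base + min (r + 1) remainder))

-- ===== PRECONDITION & SPEC =====
-- Pre_ excludes only size = 0, where Python A raises ZeroDivisionError (B raises there too).
def Pre_split_slabs_py (nz : Int) (size : Int) : Prop := size ≠ 0
instance (nz : Int) (size : Int) : Decidable (Pre_split_slabs_py nz size) := by unfold Pre_split_slabs_py; infer_instance
def pvWitness_split_slabs_py : Int × Int := (10, 3)

def Spec_split_slabs_py (nz : Int) (size : Int) (out : List (Int × Int)) : Prop := out = split_slabs_py_alt nz size
instance (nz : Int) (size : Int) (out : List (Int × Int)) : Decidable (Spec_split_slabs_py nz size out) := by unfold Spec_split_slabs_py; infer_instance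

-- ===== CLAIM (what is proved, stated in full; the proofs are below) =====
def Claim_equal_split_slabs_py : Prop := ∀ (nz : Int) (size : Int), Dom_split_slabs_py nz size → Pre_split_slabs_py nz size → Spec_split_slabs_py nz size (split_slabs_py nz size)

-- ===== LEMMAS AND PROOFS =====

-- the loop and the closed form agree on range(0, n) for any n : Nat, provided 0 ≤ remainder:
-- the accumulated start after processing ranks 0..n-1 equals n*base + min n rem
lemma split_slabs_loop_closed (base rem : Int) (hrem : 0 ≤ rem) (n : Nat) :
    (PySem.List.pyRange 0 (n : Int) 1).foldl
      (fun (st : List (Int × Int) × Int) (r : Int) =>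
        let count := base + (if r < rem then 1 else 0)
        (st.1 ++ [(st.2, st.2 + count)], st.2 + count))
      ([], 0)
    = ((PySem.List.pyRange 0 (n : Int) 1).map
        (fun r => (r * base + min r rem, (r + 1) * base + min (r + 1) rem)),
       (n : Int) * base + min (n : Int) rem) := by
  induction n with
  | zero => simp [PySem.List.pyRange, min_eq_left hrem]
  | succ n ih =>
      have h : PySem.List.pyRange 0 ((n : Int) + 1) 1
          = PySem.List.pyRange 0 (n : Int) 1 ++ [(n : Int)] :=
        PySem.List.pyRange_one_succ_right (by exact_mod_cast Int.natCast_nonneg n)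
      push_cast
      rw [h, List.foldl_append, List.map_append, ih]
      simp only [List.foldl_cons, List.foldl_nil, List.map_cons, List.map_nil]
      have hmin : min (n : Int) rem + (if (n : Int) < rem then 1 else 0)
          = min ((n : Int) + 1) rem := by
        by_cases hc : (n : Int) < rem <;> simp [hc, min_def] <;> omega
      have h2 : (n : Int) * base + min (n : Int) rem + (base + if (n : Int) < rem then 1 else 0)
          = ((n : Int) + 1) * base + min ((n : Int) + 1) rem := by
        rw [← hmin]; ring
      rw [h2]

lemma pyRange_nonpos (b : Int) (hb : b ≤ 0) : PySem.List.pyRange 0 b 1 = [] := by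
  simp [PySem.List.pyRange]
  omega

-- ===== VERDICT (by name: the statement is the Claim_ definition above) =====
theorem split_slabs_py_spec : Claim_equal_split_slabs_py := by
  intro nz size _ hpre
  unfold Pre_split_slabs_py at hpre
  unfold Spec_split_slabs_py split_slabs_py split_slabs_py_alt
  by_cases hpos : 0 < size
  · have hrem : 0 ≤ PySem.Int.mod nz size := PySem.Int.mod_nonneg nz hpos
    obtain ⟨n, rfl⟩ : ∃ n : Nat, size = (n : Int) := ⟨size.toNat, by omega⟩
    simp only []
    rw [split_slabs_loop_closed _ _ hrem n]
  · have hz : size < 0 := by omega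
    rw [pyRange_nonpos size (le_of_lt hz)]
    simp
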